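-- pv_equiv track=rewrite | github.com/dhwang0803-glitch/dxshcool | Shopping_Ad/scripts/run_ad_matching.py | _find_first_cluster
-- ===== SOURCE A (Python) =====
-- def _find_first_cluster(frames):
--     """프레임 목록에서 첫 밀집 구간(30초 내 연속 2건+) 시작점 반환."""
--     i = 0
--     while i < len(frames):
--         cluster = [frames[i]]
--         j = i + 1
--         while j < len(frames) and frames[j] - cluster[-1] <= 30:
--             cluster.append(frames[j])
--             j += 1
--         if len(cluster) >= 2:
--             return cluster[0]
--         i = j if j > i + 1 else i + 1
--     return None
-- ===== SOURCE B (Python) =====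
-- def _find_first_cluster(frames):
--     for a, b in zip(frames, frames[1:]):
--         if b - a <= 30:
--             return a
--     return None
-- ===== Notes on version B (the rewrite author's own statement) =====
-- stated objective: simpler
-- what changed: Replaces the outer/inner while loops and the maintained cluster list with a single flat scan over adjacent pairs, returning the first element of the first pair whose gap is at most 30.
import Mathlib
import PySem

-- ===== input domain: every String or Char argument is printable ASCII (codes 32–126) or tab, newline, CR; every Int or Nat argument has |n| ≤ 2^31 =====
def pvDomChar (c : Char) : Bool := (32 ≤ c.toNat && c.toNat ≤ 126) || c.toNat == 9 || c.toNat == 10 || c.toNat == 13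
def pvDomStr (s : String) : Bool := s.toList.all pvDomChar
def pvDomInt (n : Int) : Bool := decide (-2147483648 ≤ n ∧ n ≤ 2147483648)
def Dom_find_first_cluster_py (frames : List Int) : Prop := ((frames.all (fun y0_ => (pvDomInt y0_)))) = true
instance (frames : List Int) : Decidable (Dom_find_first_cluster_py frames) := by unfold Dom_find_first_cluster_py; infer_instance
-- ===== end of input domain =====

-- B replaces A's outer/inner while loops and cluster list with one flat scan over adjacent pairs (simpler decomposition, same cost).


-- ===== PORT A =====
-- inner while loop: while j < len(frames) and frames[j] - cluster[-1] <= 30: cluster.append(frames[j]); j += 1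
def innerA (frames : List Int) (cluster : List Int) (j : Nat) : List Int × Nat :=
  if _h : j < frames.length ∧ frames.getD j 0 - cluster.getLast?.getD 0 ≤ 30 then
    innerA frames (cluster ++ [frames.getD j 0]) (j + 1)
  else (cluster, j)
termination_by frames.length - j
decreasing_by omega

-- outer while loop over i
def outerA (frames : List Int) (i : Nat) : Option Int :=
  if _h : i < frames.length then
    let p := innerA frames [frames.getD i 0] (i + 1)
    if p.1.length ≥ 2 then p.1.head?
    else outerA frames (if p.2 > i + 1 then p.2 else i + 1)
  else none
termination_by frames.length - i
decreasing_by split_ifs <;> omega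

def find_first_cluster_py (frames : List Int) : Option Int := outerA frames 0

-- ===== PORT B =====
-- for a, b in zip(frames, frames[1:]): if b - a <= 30: return a; return None
def find_first_cluster_py_alt (frames : List Int) : Option Int :=
  ((frames.zip (frames.drop 1)).find? (fun p => decide (p.2 - p.1 ≤ 30))).map Prod.fst

-- ===== PRECONDITION & SPEC =====
def Spec_find_first_cluster_py (frames : List Int) (out : Option Int) : Prop := out = find_first_cluster_py_alt frames
instance (frames : List Int) (out : Option Int) : Decidable (Spec_find_first_cluster_py frames out) := by unfold Spec_find_first_cluster_py; infer_instance

-- ===== CLAIM (what is proved, stated in full; the proofs are below) =====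
def Claim_equal_find_first_cluster_py : Prop := ∀ (frames : List Int), Dom_find_first_cluster_py frames → Spec_find_first_cluster_py frames (find_first_cluster_py frames)

-- ===== LEMMAS AND PROOFS =====

-- innerA only appends to the cluster: its first component extends the input cluster.
theorem innerA_prefix (frames : List Int) (cluster : List Int) (j : Nat) :
    ∃ t, (innerA frames cluster j).1 = cluster ++ t := by
  induction cluster, j using innerA.induct frames with
  | case1 cluster j h ih =>
      obtain ⟨t, ht⟩ := ih
      refine ⟨frames.getD j 0 :: t, ?_⟩
      rw [innerA, dif_pos h, ht]; simp
  | case2 cluster j h =>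
      exact ⟨[], by rw [innerA, dif_neg h]; simp⟩

-- B's scan on a suffix, used as the invariant of the outer loop.
theorem outerA_eq_pf (frames : List Int) (n i : Nat) (hn : frames.length - i ≤ n) :
    outerA frames i =
      (((frames.drop i).zip ((frames.drop i).drop 1)).find?
        (fun p => decide (p.2 - p.1 ≤ 30))).map Prod.fst := by
  induction n generalizing i with
  | zero =>
      have hge : frames.length ≤ i := by omega
      rw [outerA, dif_neg (by omega)]
      simp [List.drop_eq_nil_of_le hge]
  | succ n ih =>
      by_cases hin : i < frames.length
      · have hdrop : frames.drop i = frames[i] :: frames.drop (i + 1) :=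
          List.drop_eq_getElem_cons hin
        have hvi : frames.getD i 0 = frames[i] := List.getD_eq_getElem _ _ hin
        rw [outerA, dif_pos hin]
        by_cases hcond : i + 1 < frames.length ∧ frames.getD (i + 1) 0 - frames.getD i 0 ≤ 30
        · -- first inner step fires: cluster has ≥ 2 elements, A returns frames[i]
          have hv1 : frames.getD (i + 1) 0 = frames[i + 1] := List.getD_eq_getElem _ _ hcond.1
          have hunf : innerA frames [frames.getD i 0] (i + 1) =
              innerA frames ([frames.getD i 0] ++ [frames.getD (i + 1) 0]) (i + 2) := by
            rw [innerA, dif_pos (by simpa using hcond)]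
          obtain ⟨t, ht⟩ := innerA_prefix frames ([frames.getD i 0] ++ [frames.getD (i + 1) 0]) (i + 2)
          have hfst : (innerA frames [frames.getD i 0] (i + 1)).1
              = frames.getD i 0 :: frames.getD (i + 1) 0 :: t := by
            rw [hunf, ht]; simp
          have hdrop1 : frames.drop (i + 1) = frames[i + 1] :: frames.drop (i + 2) :=
            List.drop_eq_getElem_cons hcond.1
          rw [if_pos (by rw [hfst]; simp)]
          rw [hfst, hdrop, hdrop1]
          simp only [List.drop_succ_cons, List.drop_zero, List.zip_cons_cons, List.find?]
          have : (frames[i + 1] - frames[i] ≤ 30) := by rw [← hvi, ← hv1]; exact hcond.2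
          simp [this, List.getElem?_eq_getElem hin]
        · -- inner loop does not fire: cluster stays [frames[i]], A moves to i+1
          have hstop : innerA frames [frames.getD i 0] (i + 1) = ([frames.getD i 0], i + 1) := by
            rw [innerA, dif_neg (by simpa using hcond)]
          rw [hstop]
          simp only [List.length_cons, List.length_nil]
          rw [if_neg (by omega), if_neg (by omega)]
          have hIH := ih (i + 1) (by omega)
          rw [hIH, hdrop]
          by_cases h1 : i + 1 < frames.length
          · have hv1 : frames.getD (i + 1) 0 = frames[i + 1] := List.getD_eq_getElem _ _ h1
            have hdrop1 : frames.drop (i + 1) = frames[i + 1] :: frames.drop (i + 2) :=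
              List.drop_eq_getElem_cons h1
            have hgt : ¬ (frames[i + 1] - frames[i] ≤ 30) := by
              rw [← hvi, ← hv1]; intro hc; exact hcond ⟨h1, hc⟩
            rw [hdrop1]
            simp only [List.drop_succ_cons, List.drop_zero, List.zip_cons_cons, List.find?]
            simp [hgt]
          · have : frames.drop (i + 1) = [] := List.drop_eq_nil_of_le (by omega)
            simp [this]
      · rw [outerA, dif_neg hin]
        have : frames.drop i = [] := List.drop_eq_nil_of_le (by omega)
        simp [this]

-- ===== VERDICT (by name: the statement is the Claim_ definition above) =====
theorem find_first_cluster_py_spec : Claim_equal_find_first_cluster_py := by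
  intro frames _
  unfold Spec_find_first_cluster_py find_first_cluster_py find_first_cluster_py_alt
  simpa using outerA_eq_pf frames frames.length 0 (by omega)
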